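-- pv_equiv track=rewrite | github.com/LindaShar/python-list-procedures-3 | main.py | list_operations
-- ===== SOURCE A (Python) =====
-- def list_operations(lst):
--     # Initializing the list
--     my_list = lst
--
--     # Finding out if the list is symmetric
--     is_symmetric = my_list == my_list[::-1]
--
--     # Finding out if any two elements can be removed from the list so that the new list is ordered
--     can_be_ordered = False
--     for i in range(len(my_list) - 1):
--         if my_list[i] <= my_list[i + 1]:
--             can_be_ordered = True
--             break
--
--     # Finding out how many different values the list contains
--     num_different_values = len(set(my_list))
--
--     return is_symmetric, can_be_ordered, num_different_values
-- ===== SOURCE B (Python) =====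
-- def list_operations(lst):
--     n = len(lst)
--     seen = set()
--     is_symmetric = True
--     can_be_ordered = False
--     for i in range(n):
--         seen.add(lst[i])
--         if lst[i] != lst[n - 1 - i]:
--             is_symmetric = False
--         if i < n - 1 and lst[i] <= lst[i + 1]:
--             can_be_ordered = True
--     return is_symmetric, can_be_ordered, len(seen)
-- ===== Notes on version B (the rewrite author's own statement) =====
-- stated objective: alternative
-- what changed: Fused A's three separate passes (list == reversed copy, adjacency loop with break, building set(lst)) into a single indexed loop that simultaneously maintains a symmetry flag, an adjacency flag and the seen-set.
import Mathlib
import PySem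

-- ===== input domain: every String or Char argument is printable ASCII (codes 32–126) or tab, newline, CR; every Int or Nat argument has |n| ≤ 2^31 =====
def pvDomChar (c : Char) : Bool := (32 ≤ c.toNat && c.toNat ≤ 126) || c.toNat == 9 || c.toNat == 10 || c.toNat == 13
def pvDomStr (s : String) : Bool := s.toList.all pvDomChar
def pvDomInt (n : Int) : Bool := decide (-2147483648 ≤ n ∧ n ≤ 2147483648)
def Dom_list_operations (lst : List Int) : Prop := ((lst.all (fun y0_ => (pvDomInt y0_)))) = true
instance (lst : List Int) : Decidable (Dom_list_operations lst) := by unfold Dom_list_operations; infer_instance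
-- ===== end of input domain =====

-- B fuses A's three separate passes (reverse-compare, adjacency loop, set build) into one
-- indexed loop maintaining three accumulators; objective: alternative (same cost, one traversal).

-- ===== PORT A =====
-- A's 'for i in range(len-1): if lst[i] <= lst[i+1]: can_be_ordered = True; break'
def list_operations_loopA (my_list : List Int) : List Int → Bool
  | [] => false
  | i :: rest =>
    if PySem.List.pyGetD my_list i 0 ≤ PySem.List.pyGetD my_list (i + 1) 0 then true
    else list_operations_loopA my_list rest

def list_operations (lst : List Int) : Bool × Bool × Int :=
  let my_list := lst
  let is_symmetric : Bool :=
    decide (PySem.List.slice? my_list none none (-1) = some my_list)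
  let can_be_ordered :=
    list_operations_loopA my_list (PySem.List.pyRange 0 ((my_list.length : Int) - 1) 1)
  let num_different_values : Int := (PySem.Set.ofList my_list).length
  (is_symmetric, can_be_ordered, num_different_values)

-- ===== PORT B =====
def list_operations_alt (lst : List Int) : Bool × Bool × Int :=
  let n : Int := lst.length
  let st :=
    (PySem.List.pyRange 0 n 1).foldl
      (fun (st : PySem.Set Int × Bool × Bool) i =>
        (PySem.Set.add st.1 (PySem.List.pyGetD lst i 0),
         (if PySem.List.pyGetD lst i 0 ≠ PySem.List.pyGetD lst (n - 1 - i) 0 then false else st.2.1),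
         (if i < n - 1 ∧ PySem.List.pyGetD lst i 0 ≤ PySem.List.pyGetD lst (i + 1) 0 then true else st.2.2)))
      (PySem.Set.empty, true, false)
  (st.2.1, st.2.2, (st.1.length : Int))

-- ===== PRECONDITION & SPEC =====
def Spec_list_operations (lst : List Int) (out : Bool × Bool × Int) : Prop := out = list_operations_alt lst
instance (lst : List Int) (out : Bool × Bool × Int) : Decidable (Spec_list_operations lst out) := by unfold Spec_list_operations; infer_instance

-- ===== CLAIM (what is proved, stated in full; the proofs are below) =====
def Claim_equal_list_operations : Prop := ∀ (lst : List Int), Dom_list_operations lst → Spec_list_operations lst (list_operations lst)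

-- ===== LEMMAS AND PROOFS =====

-- generic or-fold: a loop that only ever sets the flag to true is an 'any'
theorem foldl_or_if {α : Type} (p : α → Prop) [DecidablePred p] (l : List α) (init : Bool) :
    l.foldl (fun acc i => if p i then true else acc) init = (init || l.any (fun i => decide (p i))) := by
  induction l generalizing init with
  | nil => simp
  | cons x xs ih =>
    simp only [List.foldl_cons, List.any_cons, ih]
    by_cases h : p x <;> simp [h]

-- generic and-fold: a loop that only ever sets the flag to false is an 'all'
theorem foldl_and_if {α : Type} (p : α → Prop) [DecidablePred p] (l : List α) (init : Bool) :
    l.foldl (fun acc i => if p i then false else acc) init = (init && l.all (fun i => !decide (p i))) := by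
  induction l generalizing init with
  | nil => simp
  | cons x xs ih =>
    simp only [List.foldl_cons, List.all_cons, ih]
    by_cases h : p x <;> simp [h]

-- A's break-loop is an 'any' over the index list
theorem loopA_eq_any (my_list : List Int) (l : List Int) :
    list_operations_loopA my_list l =
      l.any (fun i => decide (PySem.List.pyGetD my_list i 0 ≤ PySem.List.pyGetD my_list (i + 1) 0)) := by
  induction l with
  | nil => rfl
  | cons x xs ih =>
    simp only [list_operations_loopA, List.any_cons, ih]
    by_cases h : PySem.List.pyGetD my_list x 0 ≤ PySem.List.pyGetD my_list (x + 1) 0 <;> simp [h]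

-- palindrome characterisation by indices
theorem reverse_eq_self_iff (lst : List Int) :
    lst.reverse = lst ↔ ∀ k, (h : k < lst.length) → lst[k] = lst[lst.length - 1 - k] := by
  constructor
  · intro hr k h
    rw [List.getElem_of_eq hr.symm h, List.getElem_reverse]
  · intro h
    apply List.ext_getElem (by simp)
    intro k h1 h2
    rw [List.getElem_reverse]
    exact (h _ (by omega)).symm

-- ===== VERDICT =====
theorem list_operations_spec : Claim_equal_list_operations := by
  intro lst _
  unfold Spec_list_operations list_operations list_operations_alt
  dsimp only
  -- split B's fused fold into three independent folds
  rw [PySem.List.foldl_prod_mk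
        (f := fun (s : PySem.Set Int) i => PySem.Set.add s (PySem.List.pyGetD lst i 0))
        (g := fun (s : Bool × Bool) i =>
          ((if PySem.List.pyGetD lst i 0 ≠ PySem.List.pyGetD lst ((lst.length : Int) - 1 - i) 0 then false else s.1),
           (if i < (lst.length : Int) - 1 ∧ PySem.List.pyGetD lst i 0 ≤ PySem.List.pyGetD lst (i + 1) 0 then true else s.2)))]
  rw [PySem.List.foldl_prod_mk
        (f := fun (s : Bool) i => if PySem.List.pyGetD lst i 0 ≠ PySem.List.pyGetD lst ((lst.length : Int) - 1 - i) 0 then false else s)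
        (g := fun (s : Bool) i => if i < (lst.length : Int) - 1 ∧ PySem.List.pyGetD lst i 0 ≤ PySem.List.pyGetD lst (i + 1) 0 then true else s)]
  refine Prod.ext ?_ (Prod.ext ?_ ?_)
  · -- symmetry component
    show decide (PySem.List.slice? lst none none (-1) = some lst) = _
    rw [PySem.List.slice?_none_none_neg_one,
        foldl_and_if (p := fun i => PySem.List.pyGetD lst i 0 ≠ PySem.List.pyGetD lst ((lst.length : Int) - 1 - i) 0)]
    simp only [Bool.true_and, Option.some.injEq]
    rw [Bool.eq_iff_iff]
    simp only [decide_eq_true_eq, List.all_eq_true, PySem.List.mem_pyRange_one,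
               Bool.not_eq_eq_eq_not, Bool.not_true, decide_eq_false_iff_not, not_not, and_imp]
    constructor
    · intro hr i h0 h1
      have hk : i.toNat < lst.length := by omega
      have hk2 : 0 ≤ (lst.length : Int) - 1 - i := by omega
      have hk3 : (lst.length : Int) - 1 - i < (lst.length : Int) := by omega
      rw [PySem.List.pyGetD_eq_getElem lst 0 h0 h1, PySem.List.pyGetD_eq_getElem lst 0 hk2 hk3]
      have hidx : ((lst.length : Int) - 1 - i).toNat = lst.length - 1 - i.toNat := by omega
      simp only [hidx]
      exact (reverse_eq_self_iff lst).1 hr i.toNat hk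
    · intro h
      rw [reverse_eq_self_iff]
      intro k hk
      have h0 : (0 : Int) ≤ (k : Int) := by omega
      have h1 : ((k : Int)) < (lst.length : Int) := by omega
      have := h (k : Int) h0 h1
      rw [PySem.List.pyGetD_eq_getElem lst 0 h0 h1,
          PySem.List.pyGetD_eq_getElem lst 0 (by omega) (by omega)] at this
      have hidx : ((lst.length : Int) - 1 - (k : Int)).toNat = lst.length - 1 - k := by omega
      simp only [hidx, Int.toNat_natCast] at this
      exact this
  · -- can_be_ordered component
    show list_operations_loopA lst (PySem.List.pyRange 0 ((lst.length : Int) - 1) 1) = _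
    rw [loopA_eq_any,
        foldl_or_if (p := fun i => i < (lst.length : Int) - 1 ∧ PySem.List.pyGetD lst i 0 ≤ PySem.List.pyGetD lst (i + 1) 0)]
    simp only [Bool.false_or]
    rw [Bool.eq_iff_iff]
    simp only [List.any_eq_true, PySem.List.mem_pyRange_one, decide_eq_true_eq]
    constructor
    · rintro ⟨i, ⟨h0, h1⟩, hp⟩
      exact ⟨i, ⟨h0, by omega⟩, h1, hp⟩
    · rintro ⟨i, ⟨h0, _⟩, h1, hp⟩
      exact ⟨i, ⟨h0, h1⟩, hp⟩
  · -- distinct-count component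
    show ((PySem.Set.ofList lst).length : Int) = _
    have hlen : ((lst.length : Nat) : Int) = PySem.List.len lst := rfl
    rw [hlen, PySem.List.foldl_pyRange_zero_pyGetD (f := fun (s : PySem.Set Int) x => PySem.Set.add s x)]
    rfl
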